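-- pv_equiv track=rewrite | github.com/bachaquer/CS470_2024_Team9 | tabfact/prompt.py | decompose_table
-- ===== SOURCE A (Python) =====
-- def decompose_table(table_original, columns):
--     table = table_original.strip().strip('\n').strip('\n').split('\n')
--     first_row = table[0].strip().split(" | ")
--     cols = columns.split(" | ")
--     indexes = []
--     ans_table = []
--     for ind in range(len(first_row)):
--         if (first_row[ind] in cols):
--             indexes.append(ind)
--     for l in range(len(table)):
--         line = table[l].strip().split(" | ")
--         if (len(line) < len(first_row)):
--             for i in range(len(first_row) - len(line)):
--                 line.append("")
--
--         processed_row = []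
--         for ind in indexes:
--             processed_row.append(line[ind])
--         ans_table.append(" | ".join(processed_row))
--     return '\n'.join(ans_table) + '\n'
-- ===== SOURCE B (Python) =====
-- def decompose_table(table_original, columns):
--     wanted = columns.split(" | ")
--     lines = table_original.strip().split('\n')
--     header = lines[0].strip().split(" | ")
--     grid = [ln.strip().split(" | ") for ln in lines]
--     # column-major: materialise each selected column, padding short rows with ''
--     kept = [[row[i] if i < len(row) else "" for row in grid]
--             for i in range(len(header)) if header[i] in wanted]
--     # transpose the kept columns back into rows
--     rows = [" | ".join(col[r] for col in kept) for r in range(len(grid))]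
--     return '\n'.join(rows) + '\n'
-- ===== Notes on version B (the rewrite author's own statement) =====
-- stated objective: alternative
-- what changed: B works column-major: it materialises each selected column of the parsed grid (padding short rows with ''), then transposes the kept columns back into rows, instead of A's row-major pass that indexes each row by a precomputed index list.
import Mathlib
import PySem

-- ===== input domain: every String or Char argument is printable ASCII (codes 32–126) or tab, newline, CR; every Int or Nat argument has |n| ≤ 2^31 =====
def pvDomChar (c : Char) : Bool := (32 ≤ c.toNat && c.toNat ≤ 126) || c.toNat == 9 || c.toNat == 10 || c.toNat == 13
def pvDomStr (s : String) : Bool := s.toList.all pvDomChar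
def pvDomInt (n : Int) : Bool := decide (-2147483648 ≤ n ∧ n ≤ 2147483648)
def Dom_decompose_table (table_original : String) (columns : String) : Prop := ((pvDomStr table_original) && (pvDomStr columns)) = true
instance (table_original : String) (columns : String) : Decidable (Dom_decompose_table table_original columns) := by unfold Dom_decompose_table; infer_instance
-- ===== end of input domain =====

-- B is column-major: it materialises each selected column of the table and transposes them
-- back into rows, instead of A's row-major index-list selection (objective: alternative).

-- shared primitive: Python s.split(sep) for a NONEMPTY sep (both ports only pass " | " / "\n");
-- exact there: PySem.Str.split? is none only for sep = "".
def pySplit (s sep : String) : List String := (PySem.Str.split? s sep).getD []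

-- ===== PORT A =====
def decompose_table (table_original : String) (columns : String) : String :=
  -- table = table_original.strip().strip('\n').strip('\n').split('\n')
  let table := pySplit (PySem.Str.stripChars (PySem.Str.stripChars (PySem.Str.strip table_original) "\n") "\n") "\n"
  -- first_row = table[0].strip().split(" | ")   (table is never empty: split returns ≥ 1 piece)
  let first_row := pySplit (PySem.Str.strip (PySem.List.pyGetD table 0 "")) " | "
  let cols := pySplit columns " | "
  -- for ind in range(len(first_row)): if first_row[ind] in cols: indexes.append(ind)
  let indexes : List Int := (PySem.List.pyRange 0 (PySem.List.len first_row)).foldl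
    (fun acc ind => if cols.contains (PySem.List.pyGetD first_row ind "") then acc ++ [ind] else acc) []
  -- for l in range(len(table)): …
  let ans_table := (PySem.List.pyRange 0 (PySem.List.len table)).foldl
    (fun acc l =>
      let line := pySplit (PySem.Str.strip (PySem.List.pyGetD table l "")) " | "
      let line := if PySem.List.len line < PySem.List.len first_row then
          (PySem.List.pyRange 0 (PySem.List.len first_row - PySem.List.len line)).foldl
            (fun ln _ => ln ++ [("" : String)]) line
        else line
      let processed_row := indexes.foldl (fun pr ind => pr ++ [PySem.List.pyGetD line ind ""]) []
      acc ++ [PySem.Str.join " | " processed_row]) []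
  PySem.Str.join "\n" ans_table ++ "\n"

-- ===== PORT B =====
def decompose_table_alt (table_original : String) (columns : String) : String :=
  let wanted := pySplit columns " | "
  let lines := pySplit (PySem.Str.strip table_original) "\n"
  let header := pySplit (PySem.Str.strip (PySem.List.pyGetD lines 0 "")) " | "
  let grid := lines.map (fun ln => pySplit (PySem.Str.strip ln) " | ")
  -- kept = [[row[i] if i < len(row) else "" for row in grid] for i in range(len(header)) if header[i] in wanted]
  let kept := ((PySem.List.pyRange 0 (PySem.List.len header)).filter
      (fun i => wanted.contains (PySem.List.pyGetD header i ""))).map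
    (fun i => grid.map (fun row =>
      if i < PySem.List.len row then PySem.List.pyGetD row i "" else ""))
  -- rows = [" | ".join(col[r] for col in kept) for r in range(len(grid))]
  let rows := (PySem.List.pyRange 0 (PySem.List.len grid)).map
    (fun r => PySem.Str.join " | " (kept.map (fun col => PySem.List.pyGetD col r "")))
  PySem.Str.join "\n" rows ++ "\n"

-- ===== PRECONDITION & SPEC =====
def Spec_decompose_table (table_original : String) (columns : String) (out : String) : Prop := out = decompose_table_alt table_original columns
instance (table_original : String) (columns : String) (out : String) : Decidable (Spec_decompose_table table_original columns out) := by unfold Spec_decompose_table; infer_instance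

-- ===== CLAIM (what is proved, stated in full; the proofs are below) =====
def Claim_equal_decompose_table : Prop := ∀ (table_original : String) (columns : String), Dom_decompose_table table_original columns → Spec_decompose_table table_original columns (decompose_table table_original columns)

-- ===== LEMMAS AND PROOFS =====

-- A's extra .strip('\n').strip('\n') after .strip() is the identity: .strip() already removed
-- leading/trailing whitespace, and '\n' is whitespace.
theorem strip_stripChars_newline (l : List Char) :
    PySem.Chars.stripChars (PySem.Chars.strip l) ['\n'] = PySem.Chars.strip l := by
  have hs : PySem.Chars.strip l
      = List.rdropWhile PySem.Chars.isspace (List.dropWhile PySem.Chars.isspace l) := rfl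
  set A : List Char := List.dropWhile PySem.Chars.isspace l with hA
  set p : Char → Bool := fun c => decide (c = '\n') with hp
  have himp : ∀ c, p c = true → PySem.Chars.isspace c = true := by
    intro c hc; simp [hp] at hc; subst hc; decide
  have h1 : List.dropWhile p (PySem.Chars.strip l) = PySem.Chars.strip l := by
    rw [List.dropWhile_eq_self_iff]
    intro hl hcontra
    have hpre : PySem.Chars.strip l <+: A := by rw [hs]; exact List.rdropWhile_prefix _ _
    have hlen : 0 < A.length := by have := hpre.length_le; omega
    have h0 : (PySem.Chars.strip l)[0] = A[0]'hlen := hpre.getElem hl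
    have hhead := List.head?_dropWhile_not PySem.Chars.isspace l
    rw [← hA, List.head?_eq_getElem?] at hhead
    simp [List.getElem?_eq_getElem hlen] at hhead
    have := himp _ hcontra
    rw [h0] at this
    simp [this] at hhead
  have h2 : List.rdropWhile p (List.rdropWhile PySem.Chars.isspace A)
      = List.rdropWhile PySem.Chars.isspace A := by
    rw [List.rdropWhile_eq_self_iff]
    intro hl hcontra
    exact absurd (himp _ hcontra) (by simpa using List.rdropWhile_last_not PySem.Chars.isspace A hl)
  calc PySem.Chars.stripChars (PySem.Chars.strip l) ['\n']
      = List.rdropWhile p (List.dropWhile p (PySem.Chars.strip l)) := by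
        simp [PySem.Chars.stripChars, List.rdropWhile, hp]
    _ = PySem.Chars.strip l := by rw [h1, hs, h2]

theorem str_strip_newlines (t : String) :
    PySem.Str.stripChars (PySem.Str.stripChars (PySem.Str.strip t) "\n") "\n"
      = PySem.Str.strip t := by
  have e1 : PySem.Str.stripChars (PySem.Str.strip t) "\n" = PySem.Str.strip t := by
    apply String.toList_inj.mp
    rw [PySem.Str.toList_stripChars, PySem.Str.toList_strip]
    exact strip_stripChars_newline t.toList
  rw [e1, e1]

-- A's padding loop appends "" (len first_row − len line) times
theorem pad_loop_eq (cells : List String) (k : Nat) :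
    (PySem.List.pyRange 0 (k : Int)).foldl (fun ln _ => ln ++ [("" : String)]) cells
      = cells ++ List.replicate k "" := by
  rw [PySem.List.pyRange_zero_natCast]
  rw [PySem.List.foldl_append_singleton_eq_map (f := fun _ => ("" : String))]
  simp [Function.comp_def, List.map_const']

-- getD with default "" ignores "" padding
theorem getD_append_replicate (cells : List String) (k i : Nat) :
    (cells ++ List.replicate k "").getD i "" = cells.getD i "" := by
  rcases Nat.lt_or_ge i cells.length with h | h
  · rw [List.getD_eq_getElem?_getD, List.getD_eq_getElem?_getD, List.getElem?_append_left h]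
  · rw [List.getD_eq_getElem?_getD, List.getD_eq_getElem?_getD, List.getElem?_append_right h,
      List.getElem?_eq_none h, List.getElem?_replicate]
    split <;> rfl

-- guarded in-range access is getD
theorem ite_len_getD (row : List String) (i : Nat) :
    (if (i : Int) < PySem.List.len row then row.getD i "" else "") = row.getD i "" := by
  split_ifs with h
  · rfl
  · have hle : row.length ≤ i := by
      simp only [PySem.List.len_eq, not_lt, Nat.cast_le] at h; exact h
    rw [List.getD_eq_getElem?_getD, List.getElem?_eq_none hle]
    rfl

-- indexing a mapped list inside its range
theorem getD_map_lt {α β : Type} (l : List α) (f : α → β) (r : Nat) (d : β) (h : r < l.length) :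
    (l.map f).getD r d = f l[r] := by
  rw [List.getD_eq_getElem?_getD, List.getElem?_map, List.getElem?_eq_getElem h]
  rfl

-- mapping a function of l.getD over range(len l) is mapping over l
theorem map_range_getD {α β : Type} (l : List α) (d : α) (F : α → β) :
    (List.range l.length).map (fun r => F (l.getD r d)) = l.map F := by
  apply List.ext_getElem
  · simp
  · intro i h1 h2
    simp only [List.getElem_map, List.getElem_range]
    rw [List.getD_eq_getElem?_getD, List.getElem?_eq_getElem (by simpa using h2)]
    rfl

-- the shared row shape: selected header positions read from one row's cells
def rowOf (idxs : List Nat) (cells : List String) : String :=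
  PySem.Str.join " | " (idxs.map (fun i => cells.getD i ""))

-- A's outer loop over range(len(table)) builds table.map F
theorem a_rows_eq {β : Type} (F : String → β) (table : List String) :
    (PySem.List.pyRange 0 (PySem.List.len table)).foldl
        (fun acc l => acc ++ [F (PySem.List.pyGetD table l "")]) []
      = table.map F := by
  rw [PySem.List.foldl_append_singleton_eq_map (f := fun l => F (PySem.List.pyGetD table l ""))]
  have h := PySem.List.map_pyGetD_pyRange_zero table ""
  calc ([] : List β) ++ (PySem.List.pyRange 0 (PySem.List.len table)).map
          (fun l => F (PySem.List.pyGetD table l ""))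
      = ((PySem.List.pyRange 0 (PySem.List.len table)).map
          (fun j => PySem.List.pyGetD table j "")).map F := by
        simp [List.map_map, Function.comp_def]
    _ = table.map F := by rw [h]

-- the filtered index list, as Nat indices
def natIdxs (wanted header : List String) : List Nat :=
  (List.range header.length).filter (fun i => wanted.contains (header.getD i ""))

-- A's index list is natIdxs cast to Int
theorem indexes_eq (wanted header : List String) :
    (PySem.List.pyRange 0 (PySem.List.len header)).foldl
        (fun acc ind => if wanted.contains (PySem.List.pyGetD header ind "") then acc ++ [ind] else acc) []
      = (natIdxs wanted header).map (fun i : Nat => (i : Int)) := by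
  rw [PySem.List.foldl_append_if (p := fun ind => wanted.contains (PySem.List.pyGetD header ind ""))
    (f := fun ind => ind)]
  have hlen : PySem.List.len header = ((header.length : Nat) : Int) := rfl
  rw [hlen, PySem.List.pyRange_zero_natCast, List.nil_append, List.map_id']
  simp only [List.filter_map, Function.comp_def, PySem.List.pyGetD_natCast]
  unfold natIdxs
  rfl

-- one row of A equals rowOf on the unpadded cells
theorem a_row_eq (wanted header cells : List String) :
    (((PySem.List.pyRange 0 (PySem.List.len header)).foldl
        (fun acc ind => if wanted.contains (PySem.List.pyGetD header ind "") then acc ++ [ind] else acc)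
        []).foldl
      (fun pr ind => pr ++ [PySem.List.pyGetD
        (if PySem.List.len cells < PySem.List.len header then
          (PySem.List.pyRange 0 (PySem.List.len header - PySem.List.len cells)).foldl
            (fun ln _ => ln ++ [("" : String)]) cells
         else cells) ind ""]) [])
    = (natIdxs wanted header).map (fun i => cells.getD i "") := by
  have hpad : (if PySem.List.len cells < PySem.List.len header then
        (PySem.List.pyRange 0 (PySem.List.len header - PySem.List.len cells)).foldl
          (fun ln _ => ln ++ [("" : String)]) cells
      else cells)
      = cells ++ List.replicate (header.length - cells.length) "" := by
    by_cases h : PySem.List.len cells < PySem.List.len header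
    · rw [if_pos h]
      have : PySem.List.len header - PySem.List.len cells
          = ((header.length - cells.length : Nat) : Int) := by
        simp only [PySem.List.len_eq]
        have := h; simp only [PySem.List.len_eq] at this; omega
      rw [this, pad_loop_eq]
    · rw [if_neg h]
      have : header.length - cells.length = 0 := by
        simp only [PySem.List.len_eq, not_lt, Nat.cast_le] at h; omega
      simp [this]
  rw [indexes_eq, hpad]
  rw [PySem.List.foldl_append_singleton_eq_map
    (f := fun ind => PySem.List.pyGetD (cells ++ List.replicate (header.length - cells.length) "") ind "")]
  simp only [List.nil_append, List.map_map, Function.comp_def, PySem.List.pyGetD_natCast]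
  exact List.map_congr_left (fun i _ => getD_append_replicate cells _ i)

-- one row of B (read across the kept columns at row r) equals rowOf on row r's cells
theorem b_row_eq (wanted header : List String) (grid : List (List String)) (r : Nat)
    (hr : r < grid.length) :
    (((PySem.List.pyRange 0 (PySem.List.len header)).filter
        (fun i => wanted.contains (PySem.List.pyGetD header i ""))).map
      (fun i => grid.map (fun row =>
        if i < PySem.List.len row then PySem.List.pyGetD row i "" else ""))).map
      (fun col => PySem.List.pyGetD col (r : Int) "")
    = (natIdxs wanted header).map (fun i => grid[r].getD i "") := by
  have : PySem.List.len header = ((header.length : Nat) : Int) := rfl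
  rw [this, PySem.List.pyRange_zero_natCast]
  rw [List.filter_map, List.map_map, List.map_map]
  have hpred : ((fun i => wanted.contains (PySem.List.pyGetD header i "")) ∘ (fun i : Nat => (i : Int)))
      = fun i : Nat => wanted.contains (header.getD i "") := by
    funext i; simp [PySem.List.pyGetD_natCast]
  rw [hpred]
  apply List.map_congr_left
  intro i _
  simp only [Function.comp_def, PySem.List.pyGetD_natCast]
  rw [getD_map_lt _ _ _ _ hr]
  exact ite_len_getD _ i

-- ===== VERDICT (by name: the statement is the Claim_ definition above) =====
set_option maxHeartbeats 1000000 in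
theorem decompose_table_spec : Claim_equal_decompose_table := by
  intro t c _
  show decompose_table t c = decompose_table_alt t c
  simp only [decompose_table, decompose_table_alt, str_strip_newlines]
  set W := pySplit c " | " with hW
  set L := pySplit (PySem.Str.strip t) "\n" with hL
  set H := pySplit (PySem.Str.strip (PySem.List.pyGetD L 0 "")) " | " with hH
  refine congrArg (fun z => PySem.Str.join "\n" z ++ "\n") ?_
  -- A side: rows = L.map (rowOf ∘ parse)
  rw [a_rows_eq (F := fun x =>
      PySem.Str.join " | "
        (((PySem.List.pyRange 0 (PySem.List.len H)).foldl
            (fun acc ind => if W.contains (PySem.List.pyGetD H ind "") then acc ++ [ind] else acc)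
            []).foldl
          (fun pr ind => pr ++ [PySem.List.pyGetD
            (if PySem.List.len (pySplit (PySem.Str.strip x) " | ") < PySem.List.len H then
              (PySem.List.pyRange 0
                  (PySem.List.len H - PySem.List.len (pySplit (PySem.Str.strip x) " | "))).foldl
                (fun ln _ => ln ++ [("" : String)]) (pySplit (PySem.Str.strip x) " | ")
             else pySplit (PySem.Str.strip x) " | ") ind ""]) []))]
  have hA : ∀ x : String,
      PySem.Str.join " | "
        (((PySem.List.pyRange 0 (PySem.List.len H)).foldl
            (fun acc ind => if W.contains (PySem.List.pyGetD H ind "") then acc ++ [ind] else acc)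
            []).foldl
          (fun pr ind => pr ++ [PySem.List.pyGetD
            (if PySem.List.len (pySplit (PySem.Str.strip x) " | ") < PySem.List.len H then
              (PySem.List.pyRange 0
                  (PySem.List.len H - PySem.List.len (pySplit (PySem.Str.strip x) " | "))).foldl
                (fun ln _ => ln ++ [("" : String)]) (pySplit (PySem.Str.strip x) " | ")
             else pySplit (PySem.Str.strip x) " | ") ind ""]) [])
      = rowOf (natIdxs W H) (pySplit (PySem.Str.strip x) " | ") := by
    intro x
    rw [a_row_eq W H (pySplit (PySem.Str.strip x) " | ")]
    rfl
  rw [List.map_congr_left (fun x _ => hA x)]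
  -- B side: rows = grid.map rowOf
  set G := L.map (fun ln => pySplit (PySem.Str.strip ln) " | ") with hG
  have hlen : PySem.List.len G = ((G.length : Nat) : Int) := rfl
  rw [hlen, PySem.List.pyRange_zero_natCast, List.map_map]
  have hB : ∀ r ∈ List.range G.length,
      ((fun r : Int =>
        PySem.Str.join " | "
          ((((PySem.List.pyRange 0 (PySem.List.len H)).filter
              (fun i => W.contains (PySem.List.pyGetD H i ""))).map
            (fun i => G.map (fun row =>
              if i < PySem.List.len row then PySem.List.pyGetD row i "" else ""))).map
            (fun col => PySem.List.pyGetD col r ""))) ∘ (fun r : Nat => (r : Int))) r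
      = rowOf (natIdxs W H) (G.getD r []) := by
    intro r hr
    simp only [Function.comp_def]
    rw [b_row_eq W H G r (by simpa using hr)]
    have : G.getD r [] = G[r]'(by simpa using hr) := by
      rw [List.getD_eq_getElem?_getD, List.getElem?_eq_getElem (by simpa using hr)]; rfl
    rw [this]; rfl
  rw [List.map_congr_left hB]
  rw [map_range_getD G [] (rowOf (natIdxs W H))]
  rw [hG, List.map_map]
  rfl
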